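-- pv_equiv track=rewrite | github.com/raulpenaguiao/project-euler | archive/Euler03__/Euler377/Euler377_tests.py | f_eff_list
-- ===== SOURCE A (Python) =====
-- def f_eff_list(n, MOD = 10**9):
--     dp_f = [[0 for _ in range(n+1)] for _ in range(n+1)]
--     dp_c = [[0 for _ in range(n+1)] for _ in range(n+1)]
--     dp_c[0][0] = 1
--     for m in range(1, n+1):
--         for k in range(1, m + 1):
--             for d in range(1, min(9, m)+1):
--                 dp_c[m][k] += dp_c[m-d][k-1]
--                 dp_c[m][k] %= MOD
--                 dp_f[m][k] += dp_f[m-d][k-1] + d*10**(k-1)*dp_c[m-d][k-1]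
--                 dp_f[m][k] %= MOD
--     return [sum(r)%MOD for r in dp_f]
-- ===== SOURCE B (Python) =====
-- def f_eff_list(n, MOD = 10**9):
--     # Linear recurrences (least-significant-digit decomposition):
--     # C[m] = number of digit strings (digits 1..9) with digit sum m,
--     # S[m] = sum of the corresponding numbers; appending a last digit d gives
--     # C[m] = sum_d C[m-d],  S[m] = sum_d (10*S[m-d] + d*C[m-d]).
--     C = [0] * (n + 1)
--     S = [0] * (n + 1)
--     C[0] = 1
--     for m in range(1, n + 1):
--         c = 0
--         s = 0
--         for d in range(1, min(9, m) + 1):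
--             c += C[m - d]
--             s += 10 * S[m - d] + d * C[m - d]
--         C[m] = c % MOD
--         S[m] = s % MOD
--     return [x % MOD for x in S]
-- ===== Notes on version B (the rewrite author's own statement) =====
-- stated objective: faster
-- what changed: B replaces A's O(n^2)-cell table dp[m][k] over digit-sum m and position k (with per-position powers of 10) by two one-dimensional linear recurrences C[m] (count) and S[m] (value-sum) obtained by peeling off the last digit, collapsing the k dimension entirely.
import Mathlib
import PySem

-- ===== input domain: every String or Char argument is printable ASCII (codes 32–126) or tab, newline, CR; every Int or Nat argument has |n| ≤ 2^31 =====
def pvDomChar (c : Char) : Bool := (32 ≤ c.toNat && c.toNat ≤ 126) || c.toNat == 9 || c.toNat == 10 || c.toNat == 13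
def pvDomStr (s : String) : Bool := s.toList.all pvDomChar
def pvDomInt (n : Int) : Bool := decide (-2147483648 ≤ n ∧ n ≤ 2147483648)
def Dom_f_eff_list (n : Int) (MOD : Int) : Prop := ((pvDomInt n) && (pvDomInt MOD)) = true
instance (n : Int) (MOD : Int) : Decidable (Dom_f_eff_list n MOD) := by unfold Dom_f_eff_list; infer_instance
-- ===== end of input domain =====

-- B collapses A's 2-D dp over (digit-sum m, position k) into linear recurrences
-- for the count C[m] and value-sum S[m]: asymptotically faster (O(n) vs O(n^2) cells).


-- ===== PORT A =====
-- Total 2-D read/write helpers for Python's xss[i][j] access; on every Pre_-admitted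
-- run all indices are nonnegative and in range, where pyGetD/pySetD are exact
-- (their defaults are never consulted).
def pvGet2 (xss : List (List Int)) (i j : Int) : Int :=
  PySem.List.pyGetD (PySem.List.pyGetD xss i []) j 0

def pvSet2 (xss : List (List Int)) (i j : Int) (v : Int) : List (List Int) :=
  PySem.List.pySetD xss i (PySem.List.pySetD (PySem.List.pyGetD xss i []) j v)

-- body of A's innermost 'for d' loop (the four statements, in order); state = (dp_f, dp_c).
-- 10**(k-1): k ≥ 1 on every executed iteration, so the Nat-exponent power is exact.
def pvInnerA (MOD m k : Int) (st : List (List Int) × List (List Int)) (d : Int) :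
    List (List Int) × List (List Int) :=
  let dpc := pvSet2 st.2 m k (pvGet2 st.2 m k + pvGet2 st.2 (m - d) (k - 1))
  let dpc := pvSet2 dpc m k (PySem.Int.mod (pvGet2 dpc m k) MOD)
  let dpf := pvSet2 st.1 m k (pvGet2 st.1 m k +
      (pvGet2 st.1 (m - d) (k - 1) + d * 10 ^ (k - 1).toNat * pvGet2 dpc (m - d) (k - 1)))
  let dpf := pvSet2 dpf m k (PySem.Int.mod (pvGet2 dpf m k) MOD)
  (dpf, dpc)

-- A's 'for d in range(1, min(9, m)+1)' loop
def pvKStepA (MOD m : Int) (st : List (List Int) × List (List Int)) (k : Int) :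
    List (List Int) × List (List Int) :=
  (PySem.List.pyRange 1 (min 9 m + 1) 1).foldl (pvInnerA MOD m k) st

-- A's 'for k in range(1, m+1)' loop
def pvMStepA (MOD : Int) (st : List (List Int) × List (List Int)) (m : Int) :
    List (List Int) × List (List Int) :=
  (PySem.List.pyRange 1 (m + 1) 1).foldl (pvKStepA MOD m) st

def f_eff_list (n : Int) (MOD : Int) : List Int :=
  let dp_f := (PySem.List.pyRange 0 (n + 1) 1).map
    (fun _ => (PySem.List.pyRange 0 (n + 1) 1).map (fun _ => (0 : Int)))
  let dp_c := (PySem.List.pyRange 0 (n + 1) 1).map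
    (fun _ => (PySem.List.pyRange 0 (n + 1) 1).map (fun _ => (0 : Int)))
  let dp_c := pvSet2 dp_c 0 0 1
  let st := (PySem.List.pyRange 1 (n + 1) 1).foldl (pvMStepA MOD) (dp_f, dp_c)
  st.1.map (fun r => PySem.Int.mod r.sum MOD)

-- ===== PORT B =====
def pvGet1 (xs : List Int) (i : Int) : Int := PySem.List.pyGetD xs i 0

-- body of B's 'for d' loop: accumulate (c, s)
def pvDStepB (C S : List Int) (m : Int) (cs : Int × Int) (d : Int) : Int × Int :=
  (cs.1 + pvGet1 C (m - d), cs.2 + (10 * pvGet1 S (m - d) + d * pvGet1 C (m - d)))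

-- body of B's 'for m' loop; state = (C, S)
def pvMStepB (MOD : Int) (st : List Int × List Int) (m : Int) : List Int × List Int :=
  let cs := (PySem.List.pyRange 1 (min 9 m + 1) 1).foldl (pvDStepB st.1 st.2 m) (0, 0)
  (PySem.List.pySetD st.1 m (PySem.Int.mod cs.1 MOD),
   PySem.List.pySetD st.2 m (PySem.Int.mod cs.2 MOD))

def f_eff_list_alt (n : Int) (MOD : Int) : List Int :=
  let C := List.replicate (n + 1).toNat (0 : Int)    -- [0] * (n+1), exact for n ≥ -1
  let S := List.replicate (n + 1).toNat (0 : Int)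
  let C := PySem.List.pySetD C 0 1
  let st := (PySem.List.pyRange 1 (n + 1) 1).foldl (pvMStepB MOD) (C, S)
  st.2.map (fun x => PySem.Int.mod x MOD)

-- ===== PRECONDITION & SPEC =====
-- Pre_ excludes exactly the inputs where the Python A raises: n < 0 (IndexError on
-- dp_c[0][0], the list comprehension is empty) and MOD = 0 (ZeroDivisionError on %=).
def Pre_f_eff_list (n : Int) (MOD : Int) : Prop := 0 ≤ n ∧ MOD ≠ 0
instance (n : Int) (MOD : Int) : Decidable (Pre_f_eff_list n MOD) := by
  unfold Pre_f_eff_list; infer_instance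

def pvWitness_f_eff_list : Int × Int := (3, 5)

def Spec_f_eff_list (n : Int) (MOD : Int) (out : List Int) : Prop := out = f_eff_list_alt n MOD
instance (n : Int) (MOD : Int) (out : List Int) : Decidable (Spec_f_eff_list n MOD out) := by
  unfold Spec_f_eff_list; infer_instance

-- ===== CLAIM (what is proved, stated in full; the proofs are below) =====
def Claim_equal_f_eff_list : Prop := ∀ (n : Int) (MOD : Int), Dom_f_eff_list n MOD →
  Pre_f_eff_list n MOD → Spec_f_eff_list n MOD (f_eff_list n MOD)

-- ===== LEMMAS AND PROOFS =====

-- ---- mathematical layer: true (un-modded) table values, A's stored values,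
-- ---- B's stored values, and the row aggregates

-- count of digit strings (digits 1..9) of length k with digit sum m
def pvCt : Nat → Nat → Int
  | m, 0 => if m = 0 then 1 else 0
  | m, k + 1 => ∑ i ∈ Finset.range 9, if i + 1 ≤ m then pvCt (m - (i + 1)) k else 0
  termination_by m k => k

-- sum of the corresponding k-digit numbers (most-significant-digit recurrence, as in A)
def pvFt : Nat → Nat → Int
  | _, 0 => 0
  | m, k + 1 => ∑ i ∈ Finset.range 9,
      if i + 1 ≤ m then
        pvFt (m - (i + 1)) k + ((i : Int) + 1) * 10 ^ k * pvCt (m - (i + 1)) k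
      else 0
  termination_by m k => k

-- A's stored (per-step-modded) cell values
def pvCs (M : Int) : Nat → Nat → Int
  | m, 0 => if m = 0 then 1 else 0
  | m, k + 1 => Int.fmod (∑ i ∈ Finset.range 9,
      if i + 1 ≤ m then pvCs M (m - (i + 1)) k else 0) M
  termination_by m k => k

def pvFs (M : Int) : Nat → Nat → Int
  | _, 0 => 0
  | m, k + 1 => Int.fmod (∑ i ∈ Finset.range 9,
      if i + 1 ≤ m then
        pvFs M (m - (i + 1)) k + ((i : Int) + 1) * 10 ^ k * pvCs M (m - (i + 1)) k
      else 0) M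
  termination_by m k => k

-- B's stored array values
def pvCB (M : Int) : Nat → Int
  | 0 => 1
  | m + 1 => Int.fmod (∑ i ∈ Finset.range 9,
      if i + 1 ≤ m + 1 then pvCB M (m - i) else 0) M
  termination_by m => m
  decreasing_by omega

def pvSB (M : Int) : Nat → Int
  | 0 => 0
  | m + 1 => Int.fmod (∑ i ∈ Finset.range 9,
      if i + 1 ≤ m + 1 then 10 * pvSB M (m - i) + ((i : Int) + 1) * pvCB M (m - i) else 0) M
  termination_by m => m
  decreasing_by all_goals omega

-- row aggregates of the true table
def pvCtT (m : Nat) : Int := ∑ k ∈ Finset.range (m + 1), pvCt m k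
def pvStT (m : Nat) : Int := ∑ k ∈ Finset.range (m + 1), pvFt m k

-- initial dp_c contents
def pvI2 (m k : Nat) : Int := if m = 0 ∧ k = 0 then 1 else 0

-- matrices as functions of their indices
def pvMat (N : Nat) (g : Nat → Nat → Int) : List (List Int) :=
  (List.range N).map (fun m => (List.range N).map (g m))

-- state of dp_c / dp_f after the outer loop has fully processed rows 1..m0
-- and, within row m0, columns 1..k0
def pvStgC (M : Int) (m0 k0 m k : Nat) : Int :=
  if m < m0 ∨ (m = m0 ∧ k ≤ k0) then pvCs M m k else pvI2 m k
def pvStgF (M : Int) (m0 k0 m k : Nat) : Int :=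
  if m < m0 ∨ (m = m0 ∧ k ≤ k0) then pvFs M m k else 0

-- ---- ZMOD plumbing
theorem pv_fmod_congr {a b M : Int} (h : a ≡ b [ZMOD M]) : Int.fmod a M = Int.fmod b M := by
  have h' : a % M = b % M := h
  rw [Int.fmod_eq_emod, Int.fmod_eq_emod, h']
  congr 1
  apply if_congr (or_congr Iff.rfl _) rfl rfl
  rw [← EuclideanDomain.mod_eq_zero, ← EuclideanDomain.mod_eq_zero, h']

theorem pv_fmod_modEq (a M : Int) : Int.fmod a M ≡ a [ZMOD M] := by
  rw [Int.fmod_def, Int.ModEq]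
  simp [Int.sub_mul_emod_self_left]

theorem pv_sum_modEq {M : Int} (s : Finset ℕ) (f g : ℕ → Int)
    (h : ∀ i ∈ s, f i ≡ g i [ZMOD M]) : (∑ i ∈ s, f i) ≡ (∑ i ∈ s, g i) [ZMOD M] := by
  induction s using Finset.induction_on with
  | empty => rfl
  | insert x s hx ih =>
    rw [Finset.sum_insert hx, Finset.sum_insert hx]
    exact (h x (Finset.mem_insert_self x s)).add (ih fun i hi => h i (Finset.mem_insert_of_mem hi))

theorem pv_sum_ite (c : Prop) [Decidable c] (s : Finset ℕ) (f : ℕ → Int) :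
    (∑ i ∈ s, if c then f i else 0) = if c then ∑ i ∈ s, f i else 0 := by
  split_ifs <;> simp

-- ---- vanishing above the diagonal
theorem pvCt_vanish : ∀ k m, m < k → pvCt m k = 0 := by
  intro k
  induction k with
  | zero => intro m h; omega
  | succ k ih =>
    intro m h
    rw [pvCt]
    apply Finset.sum_eq_zero
    intro i _
    split_ifs with hg
    · exact ih _ (by omega)
    · rfl
theorem pvFt_vanish : ∀ k m, m < k → pvFt m k = 0 := by
  intro k
  induction k with
  | zero => intro m h; omega
  | succ k ih =>
    intro m h
    rw [pvFt]
    apply Finset.sum_eq_zero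
    intro i _
    split_ifs with hg
    · rw [ih _ (by omega), pvCt_vanish k _ (by omega)]; ring
    · rfl
theorem pvCs_vanish (M : Int) : ∀ k m, m < k → pvCs M m k = 0 := by
  intro k
  induction k with
  | zero => intro m h; omega
  | succ k ih =>
    intro m h
    rw [pvCs]
    have hz : (∑ i ∈ Finset.range 9, if i + 1 ≤ m then pvCs M (m - (i + 1)) k else 0) = 0 := by
      apply Finset.sum_eq_zero
      intro i _
      split_ifs with hg
      · exact ih _ (by omega)
      · rfl
    rw [hz, Int.zero_fmod]
theorem pvFs_vanish (M : Int) : ∀ k m, m < k → pvFs M m k = 0 := by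
  intro k
  induction k with
  | zero => intro m h; omega
  | succ k ih =>
    intro m h
    rw [pvFs]
    have hz : (∑ i ∈ Finset.range 9, if i + 1 ≤ m then
        pvFs M (m - (i + 1)) k + ((i : Int) + 1) * 10 ^ k * pvCs M (m - (i + 1)) k else 0) = 0 := by
      apply Finset.sum_eq_zero
      intro i _
      split_ifs with hg
      · rw [ih _ (by omega), pvCs_vanish M k _ (by omega)]; ring
      · rfl
    rw [hz, Int.zero_fmod]

-- ---- stored ≡ true
theorem pvCs_modEq (M : Int) : ∀ k m, pvCs M m k ≡ pvCt m k [ZMOD M] := by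
  intro k
  induction k with
  | zero => intro m; rw [pvCs, pvCt]
  | succ k ih =>
    intro m
    rw [pvCs, pvCt]
    refine (pv_fmod_modEq _ M).trans (pv_sum_modEq _ _ _ ?_)
    intro i _
    split_ifs with hg
    · exact ih _
    · rfl
theorem pvFs_modEq (M : Int) : ∀ k m, pvFs M m k ≡ pvFt m k [ZMOD M] := by
  intro k
  induction k with
  | zero => intro m; rw [pvFs, pvFt]
  | succ k ih =>
    intro m
    rw [pvFs, pvFt]
    refine (pv_fmod_modEq _ M).trans (pv_sum_modEq _ _ _ ?_)
    intro i _
    split_ifs with hg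
    · exact (ih _).add (Int.ModEq.mul_left _ (pvCs_modEq M k _))
    · rfl

-- ---- the least-significant-digit recurrence for pvFt
theorem pvFt_lsd : ∀ k m, pvFt m (k + 1) =
    ∑ i ∈ Finset.range 9, (if i + 1 ≤ m then
      10 * pvFt (m - (i + 1)) k + ((i : Int) + 1) * pvCt (m - (i + 1)) k else 0) := by
  intro k
  induction k with
  | zero =>
    intro m
    rw [pvFt]
    apply Finset.sum_congr rfl
    intro i _
    split_ifs with hg
    · simp only [pvFt, pow_zero]; ring
    · rfl
  | succ k ih =>
    intro m
    calc pvFt m (k + 1 + 1)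
        = ∑ e ∈ Finset.range 9, ∑ i ∈ Finset.range 9,
            (if e + 1 ≤ m then
              (if i + 1 ≤ m - (e + 1) then
                10 * pvFt (m - (e + 1) - (i + 1)) k + ((i : Int) + 1) * pvCt (m - (e + 1) - (i + 1)) k
                  + ((e : Int) + 1) * 10 ^ (k + 1) * pvCt (m - (e + 1) - (i + 1)) k
               else 0)
             else 0) := by
          rw [pvFt]
          apply Finset.sum_congr rfl
          intro e _
          split_ifs with he
          · rw [ih, pvCt, Finset.mul_sum, ← Finset.sum_add_distrib]
            apply Finset.sum_congr rfl
            intro i _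
            split_ifs with hi
            · ring
            · ring
          · simp
      _ = ∑ i ∈ Finset.range 9, ∑ e ∈ Finset.range 9,
            (if e + 1 ≤ m then
              (if i + 1 ≤ m - (e + 1) then
                10 * pvFt (m - (e + 1) - (i + 1)) k + ((i : Int) + 1) * pvCt (m - (e + 1) - (i + 1)) k
                  + ((e : Int) + 1) * 10 ^ (k + 1) * pvCt (m - (e + 1) - (i + 1)) k
               else 0)
             else 0) := Finset.sum_comm
      _ = ∑ i ∈ Finset.range 9, (if i + 1 ≤ m then
            10 * pvFt (m - (i + 1)) (k + 1) + ((i : Int) + 1) * pvCt (m - (i + 1)) (k + 1) else 0) := by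
          apply Finset.sum_congr rfl
          intro i _
          split_ifs with hi
          · rw [pvFt, pvCt, Finset.mul_sum, Finset.mul_sum, ← Finset.sum_add_distrib]
            apply Finset.sum_congr rfl
            intro e _
            split_ifs with h1 h2 h3
            · have hx : m - (e + 1) - (i + 1) = m - (i + 1) - (e + 1) := by omega
              rw [hx, pow_succ]
              ring
            all_goals try (exfalso; omega)
            all_goals ring
          · have hz : ∀ e ∈ Finset.range 9, (if e + 1 ≤ m then
                (if i + 1 ≤ m - (e + 1) then
                  10 * pvFt (m - (e + 1) - (i + 1)) k + ((i : Int) + 1) * pvCt (m - (e + 1) - (i + 1)) k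
                    + ((e : Int) + 1) * 10 ^ (k + 1) * pvCt (m - (e + 1) - (i + 1)) k
                 else 0)
               else 0) = 0 := by
              intro e _
              split_ifs with h1 h2
              · exfalso; omega
              · rfl
              · rfl
            rw [Finset.sum_eq_zero hz]


-- ---- truncated row sums
theorem pvCtT_eq (m N : Nat) (h : m < N) : (∑ k ∈ Finset.range N, pvCt m k) = pvCtT m := by
  unfold pvCtT
  have hsub : Finset.range (m + 1) ⊆ Finset.range N := Finset.range_subset.mpr (fun x hx => Finset.mem_range.mpr (by omega))
  refine (Finset.sum_subset hsub ?_).symm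
  intro k _ hk
  rw [Finset.mem_range] at hk
  exact pvCt_vanish k m (by omega)
theorem pvStT_eq (m N : Nat) (h : m < N) : (∑ k ∈ Finset.range N, pvFt m k) = pvStT m := by
  unfold pvStT
  have hsub : Finset.range (m + 1) ⊆ Finset.range N := Finset.range_subset.mpr (fun x hx => Finset.mem_range.mpr (by omega))
  refine (Finset.sum_subset hsub ?_).symm
  intro k _ hk
  rw [Finset.mem_range] at hk
  exact pvFt_vanish k m (by omega)

-- ---- summed recurrences for the aggregates
theorem pvCtT_rec (m : Nat) (h : 1 ≤ m) : pvCtT m =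
    ∑ i ∈ Finset.range 9, (if i + 1 ≤ m then pvCtT (m - (i + 1)) else 0) := by
  calc pvCtT m = (∑ k ∈ Finset.range m, pvCt m (k + 1)) + pvCt m 0 := by
        rw [pvCtT, Finset.sum_range_succ']
    _ = ∑ k ∈ Finset.range m, ∑ i ∈ Finset.range 9,
          (if i + 1 ≤ m then pvCt (m - (i + 1)) k else 0) := by
        have h0 : pvCt m 0 = 0 := by rw [pvCt]; simp only [if_neg (by omega : ¬ m = 0)]
        rw [h0, add_zero]
        apply Finset.sum_congr rfl
        intro k _
        rw [pvCt]
    _ = ∑ i ∈ Finset.range 9, ∑ k ∈ Finset.range m,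
          (if i + 1 ≤ m then pvCt (m - (i + 1)) k else 0) := Finset.sum_comm
    _ = ∑ i ∈ Finset.range 9, (if i + 1 ≤ m then pvCtT (m - (i + 1)) else 0) := by
        apply Finset.sum_congr rfl
        intro i _
        rw [pv_sum_ite]
        split_ifs with hg
        · exact pvCtT_eq (m - (i + 1)) m (by omega)
        · rfl
theorem pvStT_rec (m : Nat) : pvStT m =
    ∑ i ∈ Finset.range 9, (if i + 1 ≤ m then
      10 * pvStT (m - (i + 1)) + ((i : Int) + 1) * pvCtT (m - (i + 1)) else 0) := by
  calc pvStT m = (∑ k ∈ Finset.range m, pvFt m (k + 1)) + pvFt m 0 := by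
        rw [pvStT, Finset.sum_range_succ']
    _ = ∑ k ∈ Finset.range m, ∑ i ∈ Finset.range 9,
          (if i + 1 ≤ m then
            10 * pvFt (m - (i + 1)) k + ((i : Int) + 1) * pvCt (m - (i + 1)) k else 0) := by
        rw [show pvFt m 0 = 0 from by rw [pvFt], add_zero]
        apply Finset.sum_congr rfl
        intro k _
        rw [pvFt_lsd]
    _ = ∑ i ∈ Finset.range 9, ∑ k ∈ Finset.range m,
          (if i + 1 ≤ m then
            10 * pvFt (m - (i + 1)) k + ((i : Int) + 1) * pvCt (m - (i + 1)) k else 0) :=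
        Finset.sum_comm
    _ = ∑ i ∈ Finset.range 9, (if i + 1 ≤ m then
          10 * pvStT (m - (i + 1)) + ((i : Int) + 1) * pvCtT (m - (i + 1)) else 0) := by
        apply Finset.sum_congr rfl
        intro i _
        rw [pv_sum_ite]
        split_ifs with hg
        · rw [Finset.sum_add_distrib, ← Finset.mul_sum, ← Finset.mul_sum,
            pvStT_eq (m - (i + 1)) m (by omega), pvCtT_eq (m - (i + 1)) m (by omega)]
        · rfl

-- ---- B's stored values are the aggregates mod M
theorem pvCB_modEq (M : Int) : ∀ m, pvCB M m ≡ pvCtT m [ZMOD M] := by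
  intro m
  induction m using Nat.strong_induction_on with
  | _ m ih =>
    match m with
    | 0 =>
      have h1 : pvCtT 0 = 1 := by simp [pvCtT, pvCt]
      rw [pvCB, h1]
    | m + 1 =>
      rw [pvCB, pvCtT_rec (m + 1) (by omega)]
      refine (pv_fmod_modEq _ M).trans (pv_sum_modEq _ _ _ ?_)
      intro i _
      split_ifs with hg
      · rw [show m + 1 - (i + 1) = m - i from by omega]
        exact ih (m - i) (by omega)
      · rfl
theorem pvSB_modEq (M : Int) : ∀ m, pvSB M m ≡ pvStT m [ZMOD M] := by
  intro m
  induction m using Nat.strong_induction_on with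
  | _ m ih =>
    match m with
    | 0 =>
      have h1 : pvStT 0 = 0 := by simp [pvStT, pvFt]
      rw [pvSB, h1]
    | m + 1 =>
      rw [pvSB, pvStT_rec (m + 1)]
      refine (pv_fmod_modEq _ M).trans (pv_sum_modEq _ _ _ ?_)
      intro i _
      split_ifs with hg
      · rw [show m + 1 - (i + 1) = m - i from by omega]
        exact (Int.ModEq.mul_left 10 (ih (m - i) (by omega))).add
          (Int.ModEq.mul_left _ (pvCB_modEq M (m - i)))
      · rfl

-- ---- matrix lemmas
theorem pvMat_congr {N : Nat} {g g' : Nat → Nat → Int}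
    (h : ∀ m < N, ∀ k < N, g m k = g' m k) : pvMat N g = pvMat N g' := by
  unfold pvMat
  apply List.map_congr_left
  intro m hm
  rw [List.mem_range] at hm
  apply List.map_congr_left
  intro k hk
  rw [List.mem_range] at hk
  exact h m hm k hk

theorem pvGet2_mat {N : Nat} (g : Nat → Nat → Int) {m k : Nat} (hm : m < N) (hk : k < N) :
    pvGet2 (pvMat N g) (m : Int) (k : Int) = g m k := by
  unfold pvGet2 pvMat
  rw [PySem.List.pyGetD_natCast, PySem.List.pyGetD_natCast,
    PySem.List.getD_map_range _ _ _ _ hm, PySem.List.getD_map_range _ _ _ _ hk]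

theorem pvSet2_mat {N : Nat} (g : Nat → Nat → Int) {m k : Nat} (hm : m < N) (hk : k < N)
    (v : Int) : pvSet2 (pvMat N g) (m : Int) (k : Int) v =
      pvMat N (fun m' k' => if m' = m ∧ k' = k then v else g m' k') := by
  unfold pvSet2 pvMat
  rw [PySem.List.pyGetD_natCast, PySem.List.getD_map_range _ _ _ _ hm,
    PySem.List.pySetD_natCast, PySem.List.pySetD_natCast]
  apply List.ext_getElem
  · simp
  · intro i h1 h2
    rw [List.getElem_set]
    simp only [List.getElem_map, List.getElem_range]
    split_ifs with hi
    · subst hi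
      apply List.ext_getElem
      · simp
      · intro j h3 h4
        rw [List.getElem_set]
        simp only [List.getElem_map, List.getElem_range]
        by_cases hj : k = j
        · subst hj; simp
        · rw [if_neg hj, if_neg (fun h => hj h.2.symm)]
    · apply List.ext_getElem
      · simp
      · intro j h3 h4
        simp only [List.getElem_map, List.getElem_range]
        rw [if_neg (fun h => hi h.1.symm)]


-- ---- inner-loop accumulators of port A (cell (m0,k0) after j iterations of the d-loop)
def pvAccC (M : Int) (m0 k0 : Nat) : Nat → Int
  | 0 => 0
  | j + 1 => Int.fmod (pvAccC M m0 k0 j + pvCs M (m0 - (j + 1)) (k0 - 1)) M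

def pvAccF (M : Int) (m0 k0 : Nat) : Nat → Int
  | 0 => 0
  | j + 1 => Int.fmod (pvAccF M m0 k0 j +
      (pvFs M (m0 - (j + 1)) (k0 - 1) +
        ((j : Int) + 1) * 10 ^ (k0 - 1) * pvCs M (m0 - (j + 1)) (k0 - 1))) M

def pvMidF (M : Int) (N m0 k0 j : Nat) : List (List Int) :=
  pvMat N (fun m k => if m = m0 ∧ k = k0 then pvAccF M m0 k0 j else pvStgF M m0 (k0 - 1) m k)
def pvMidC (M : Int) (N m0 k0 j : Nat) : List (List Int) :=
  pvMat N (fun m k => if m = m0 ∧ k = k0 then pvAccC M m0 k0 j else pvStgC M m0 (k0 - 1) m k)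

theorem pv_sum_min9 (m : Nat) (h : Nat → Int) :
    (∑ j ∈ Finset.range (min 9 m), h j) = ∑ i ∈ Finset.range 9, (if i + 1 ≤ m then h i else 0) := by
  have hs : Finset.range (min 9 m) ⊆ Finset.range 9 :=
    Finset.range_subset.mpr (fun x hx => Finset.mem_range.mpr (by omega))
  calc (∑ j ∈ Finset.range (min 9 m), h j)
      = ∑ j ∈ Finset.range (min 9 m), (if j + 1 ≤ m then h j else 0) := by
        apply Finset.sum_congr rfl
        intro j hj
        rw [Finset.mem_range] at hj
        rw [if_pos (by omega)]
    _ = ∑ i ∈ Finset.range 9, (if i + 1 ≤ m then h i else 0) := by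
        apply Finset.sum_subset hs
        intro x hx hnx
        rw [Finset.mem_range] at hx
        rw [Finset.mem_range] at hnx
        rw [if_neg (by omega)]

theorem pvAccC_eq (M : Int) (m0 k0 : Nat) : ∀ J, 1 ≤ J →
    pvAccC M m0 k0 J = Int.fmod (∑ j ∈ Finset.range J, pvCs M (m0 - (j + 1)) (k0 - 1)) M := by
  intro J
  induction J with
  | zero => intro h; omega
  | succ J ih =>
    intro _
    by_cases hJ : 1 ≤ J
    · rw [pvAccC, ih hJ, Finset.sum_range_succ]
      exact pv_fmod_congr (((pv_fmod_modEq _ M).add_right _))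
    · have hJ0 : J = 0 := by omega
      subst hJ0
      rw [pvAccC, pvAccC, Finset.sum_range_one, zero_add]

theorem pvAccF_eq (M : Int) (m0 k0 : Nat) : ∀ J, 1 ≤ J →
    pvAccF M m0 k0 J = Int.fmod (∑ j ∈ Finset.range J,
      (pvFs M (m0 - (j + 1)) (k0 - 1) +
        ((j : Int) + 1) * 10 ^ (k0 - 1) * pvCs M (m0 - (j + 1)) (k0 - 1))) M := by
  intro J
  induction J with
  | zero => intro h; omega
  | succ J ih =>
    intro _
    by_cases hJ : 1 ≤ J
    · rw [pvAccF, ih hJ, Finset.sum_range_succ]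
      exact pv_fmod_congr (((pv_fmod_modEq _ M).add_right _))
    · have hJ0 : J = 0 := by omega
      subst hJ0
      rw [pvAccF, pvAccF, Finset.sum_range_one, zero_add]

theorem pvInnerA_step (M : Int) (N m0 k0 j : Nat) (hm : m0 < N) (hk1 : 1 ≤ k0) (hk : k0 ≤ m0)
    (hj : j + 1 ≤ min 9 m0) :
    pvInnerA M (m0 : Int) (k0 : Int) (pvMidF M N m0 k0 j, pvMidC M N m0 k0 j) ((j + 1 : Nat) : Int)
      = (pvMidF M N m0 k0 (j + 1), pvMidC M N m0 k0 (j + 1)) := by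
  have h1 : 1 ≤ m0 := le_trans hk1 hk
  have hjm : j + 1 ≤ m0 := le_trans hj (min_le_right _ _)
  have hkN : k0 < N := by omega
  have hmdN : m0 - (j + 1) < N := by omega
  have hkdN : k0 - 1 < N := by omega
  have hmd : (m0 : Int) - ((j + 1 : Nat) : Int) = ((m0 - (j + 1) : Nat) : Int) := by omega
  have hkd : (k0 : Int) - 1 = ((k0 - 1 : Nat) : Int) := by omega
  have hne : ¬ (m0 - (j + 1) = m0 ∧ k0 - 1 = k0) := by omega
  unfold pvInnerA pvMidF pvMidC
  simp only [hmd, hkd, Int.toNat_natCast]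
  simp only [pvGet2_mat, pvSet2_mat, hm, hkN, hmdN, hkdN]
  simp only [hne, and_self, if_true, if_false]
  have hstgC : pvStgC M m0 (k0 - 1) (m0 - (j + 1)) (k0 - 1) = pvCs M (m0 - (j + 1)) (k0 - 1) := by
    unfold pvStgC
    rw [if_pos (Or.inl (by omega))]
  have hstgF : pvStgF M m0 (k0 - 1) (m0 - (j + 1)) (k0 - 1) = pvFs M (m0 - (j + 1)) (k0 - 1) := by
    unfold pvStgF
    rw [if_pos (Or.inl (by omega))]
  rw [hstgC, hstgF, Prod.mk.injEq]
  constructor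
  · apply pvMat_congr
    intro m hm' k hk'
    by_cases hc : (m = m0 ∧ k = k0)
    · simp only [if_pos hc]
      rw [pvAccF]
      simp only [PySem.Int.mod]
      congr 1
    · simp only [if_neg hc]
  · apply pvMat_congr
    intro m hm' k hk'
    by_cases hc : (m = m0 ∧ k = k0)
    · simp only [if_pos hc]
      rw [pvAccC]
      simp only [PySem.Int.mod]
    · simp only [if_neg hc]

theorem pvInnerA_fold (M : Int) (N m0 k0 : Nat) (hm : m0 < N) (hk1 : 1 ≤ k0) (hk : k0 ≤ m0) :
    ∀ J, J ≤ min 9 m0 →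
    (List.range J).foldl (fun st j => pvInnerA M (m0 : Int) (k0 : Int) st ((j + 1 : Nat) : Int))
        (pvMidF M N m0 k0 0, pvMidC M N m0 k0 0)
      = (pvMidF M N m0 k0 J, pvMidC M N m0 k0 J) := by
  intro J
  induction J with
  | zero => intro _; rfl
  | succ J ih =>
    intro hJ
    rw [List.range_succ, List.foldl_append, ih (by omega)]
    simpa using pvInnerA_step M N m0 k0 J hm hk1 hk hJ

-- ---- loop characterisations, port A
theorem pvKStepA_char (M : Int) (N m0 k0 : Nat) (hm : m0 < N) (hk1 : 1 ≤ k0) (hk : k0 ≤ m0) :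
    pvKStepA M (m0 : Int) (pvMat N (pvStgF M m0 (k0 - 1)), pvMat N (pvStgC M m0 (k0 - 1))) (k0 : Int)
      = (pvMat N (pvStgF M m0 k0), pvMat N (pvStgC M m0 k0)) := by
  have h1 : 1 ≤ m0 := le_trans hk1 hk
  unfold pvKStepA
  have hr : PySem.List.pyRange 1 (min 9 (m0 : Int) + 1) 1
      = (List.range (min 9 m0)).map (fun j => ((j + 1 : Nat) : Int)) := by
    rw [PySem.List.pyRange_one]
    rw [show ((min 9 (m0 : Int) + 1) - 1).toNat = min 9 m0 from by omega]
    apply List.map_congr_left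
    intro j _
    omega
  rw [hr, List.foldl_map]
  have hmid0F : pvMat N (pvStgF M m0 (k0 - 1)) = pvMidF M N m0 k0 0 := by
    unfold pvMidF
    apply pvMat_congr
    intro m hm' k hk'
    by_cases hc : (m = m0 ∧ k = k0)
    · obtain ⟨rfl, rfl⟩ := hc
      rw [if_pos ⟨rfl, rfl⟩, pvAccF]
      unfold pvStgF
      rw [if_neg (by omega)]
    · rw [if_neg hc]
  have hmid0C : pvMat N (pvStgC M m0 (k0 - 1)) = pvMidC M N m0 k0 0 := by
    unfold pvMidC
    apply pvMat_congr
    intro m hm' k hk'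
    by_cases hc : (m = m0 ∧ k = k0)
    · obtain ⟨rfl, rfl⟩ := hc
      rw [if_pos ⟨rfl, rfl⟩, pvAccC]
      unfold pvStgC pvI2
      rw [if_neg (by omega), if_neg (by omega)]
    · rw [if_neg hc]
  rw [hmid0F, hmid0C, pvInnerA_fold M N m0 k0 hm hk1 hk (min 9 m0) le_rfl]
  obtain ⟨k0', rfl⟩ : ∃ t, k0 = t + 1 := ⟨k0 - 1, by omega⟩
  rw [Prod.mk.injEq]
  constructor
  · unfold pvMidF
    apply pvMat_congr
    intro m hm' k hk'
    by_cases hc : (m = m0 ∧ k = k0' + 1)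
    · obtain ⟨rfl, rfl⟩ := hc
      rw [if_pos ⟨rfl, rfl⟩]
      rw [pvAccF_eq M m (k0' + 1) (min 9 m) (by omega)]
      unfold pvStgF
      rw [if_pos (Or.inr ⟨rfl, le_refl _⟩)]
      rw [pv_sum_min9 m _, pvFs]
      simp only [Nat.add_sub_cancel]
    · rw [if_neg hc]
      unfold pvStgF
      split_ifs with h2 h3 h3
      · rfl
      · exfalso; omega
      · exact absurd ⟨by omega, by omega⟩ hc
      · rfl
  · unfold pvMidC
    apply pvMat_congr
    intro m hm' k hk'
    by_cases hc : (m = m0 ∧ k = k0' + 1)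
    · obtain ⟨rfl, rfl⟩ := hc
      rw [if_pos ⟨rfl, rfl⟩]
      rw [pvAccC_eq M m (k0' + 1) (min 9 m) (by omega)]
      unfold pvStgC
      rw [if_pos (Or.inr ⟨rfl, le_refl _⟩)]
      rw [pv_sum_min9 m _, pvCs]
      simp only [Nat.add_sub_cancel]
    · rw [if_neg hc]
      unfold pvStgC
      split_ifs with h2 h3 h3
      · rfl
      · exfalso; omega
      · exact absurd ⟨by omega, by omega⟩ hc
      · rfl

theorem pvKfold (M : Int) (N m0 : Nat) (h1 : 1 ≤ m0) (hm : m0 < N) : ∀ K, K ≤ m0 →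
    (List.range K).foldl (fun st k => pvKStepA M (m0 : Int) st ((k + 1 : Nat) : Int))
        (pvMat N (pvStgF M m0 0), pvMat N (pvStgC M m0 0))
      = (pvMat N (pvStgF M m0 K), pvMat N (pvStgC M m0 K)) := by
  intro K
  induction K with
  | zero => intro _; rfl
  | succ K ih =>
    intro hK
    rw [List.range_succ, List.foldl_append, ih (by omega)]
    have h := pvKStepA_char M N m0 (K + 1) hm (by omega) hK
    simp only [Nat.add_sub_cancel] at h
    simpa using h

theorem pvStgF_glue (M : Int) (N m0 : Nat) (h1 : 1 ≤ m0) :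
    pvMat N (pvStgF M (m0 - 1) (m0 - 1)) = pvMat N (pvStgF M m0 0) := by
  apply pvMat_congr
  intro m hm' k hk'
  unfold pvStgF
  split_ifs with ha hb hb
  · rfl
  · exfalso; omega
  · have hcc : (m = m0 - 1 ∧ m < k) ∨ (m = m0 ∧ k = 0) := by omega
    rcases hcc with ⟨_, hkm⟩ | ⟨rfl, rfl⟩
    · rw [pvFs_vanish M k m hkm]
    · rw [pvFs]
  · rfl

theorem pvStgC_glue (M : Int) (N m0 : Nat) (h1 : 1 ≤ m0) :
    pvMat N (pvStgC M (m0 - 1) (m0 - 1)) = pvMat N (pvStgC M m0 0) := by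
  apply pvMat_congr
  intro m hm' k hk'
  unfold pvStgC
  split_ifs with ha hb hb
  · rfl
  · exfalso; omega
  · have hcc : (m = m0 - 1 ∧ m < k) ∨ (m = m0 ∧ k = 0) := by omega
    rcases hcc with ⟨_, hkm⟩ | ⟨rfl, rfl⟩
    · rw [pvCs_vanish M k m hkm]
      unfold pvI2
      rw [if_neg (by omega)]
    · rw [pvCs]
      unfold pvI2
      rw [if_neg (by omega), if_neg (by omega)]
  · rfl

theorem pvMStepA_char (M : Int) (N m0 : Nat) (hm1 : 1 ≤ m0) (hm : m0 < N) :
    pvMStepA M (pvMat N (pvStgF M (m0 - 1) (m0 - 1)), pvMat N (pvStgC M (m0 - 1) (m0 - 1))) (m0 : Int)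
      = (pvMat N (pvStgF M m0 m0), pvMat N (pvStgC M m0 m0)) := by
  unfold pvMStepA
  have hr : PySem.List.pyRange 1 ((m0 : Int) + 1) 1
      = (List.range m0).map (fun j => ((j + 1 : Nat) : Int)) := by
    rw [PySem.List.pyRange_one]
    rw [show (((m0 : Int) + 1) - 1).toNat = m0 from by omega]
    apply List.map_congr_left
    intro j _
    omega
  rw [hr, List.foldl_map, pvStgF_glue M N m0 hm1, pvStgC_glue M N m0 hm1]
  exact pvKfold M N m0 hm1 hm m0 le_rfl

theorem pvMfold (M : Int) (N : Nat) : ∀ T, T < N →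
    (List.range T).foldl (fun st m => pvMStepA M st ((m + 1 : Nat) : Int))
        (pvMat N (pvStgF M 0 0), pvMat N (pvStgC M 0 0))
      = (pvMat N (pvStgF M T T), pvMat N (pvStgC M T T)) := by
  intro T
  induction T with
  | zero => intro _; rfl
  | succ T ih =>
    intro hT
    rw [List.range_succ, List.foldl_append, ih (by omega)]
    have h := pvMStepA_char M N (T + 1) (by omega) hT
    simp only [Nat.add_sub_cancel] at h
    simpa using h

theorem pv_list_fin (N : Nat) (f : Nat → Int) :
    ((List.range N).map f).sum = ∑ i ∈ Finset.range N, f i := rfl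

theorem pvA_char (n M : Int) (h : 0 ≤ n) : f_eff_list n M =
    (List.range (n.toNat + 1)).map
      (fun m => Int.fmod (∑ k ∈ Finset.range (n.toNat + 1), pvFs M m k) M) := by
  unfold f_eff_list
  dsimp only
  have hr0 : PySem.List.pyRange 0 (n + 1) 1
      = (List.range (n.toNat + 1)).map (fun j => ((j : Nat) : Int)) := by
    rw [PySem.List.pyRange_one]
    rw [show ((n + 1) - 0).toNat = n.toNat + 1 from by omega]
    apply List.map_congr_left
    intro j _
    omega
  have hr1 : PySem.List.pyRange 1 (n + 1) 1
      = (List.range n.toNat).map (fun j => ((j + 1 : Nat) : Int)) := by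
    rw [PySem.List.pyRange_one]
    rw [show ((n + 1) - 1).toNat = n.toNat from by omega]
    apply List.map_congr_left
    intro j _
    omega
  rw [hr0, hr1, List.foldl_map]
  have hzero : (((List.range (n.toNat + 1)).map (fun j => ((j : Nat) : Int))).map
      (fun _ => ((List.range (n.toNat + 1)).map (fun j => ((j : Nat) : Int))).map (fun _ => (0 : Int))))
      = pvMat (n.toNat + 1) (fun _ _ => (0 : Int)) := by
    unfold pvMat
    rw [List.map_map]
    apply List.map_congr_left
    intro x _
    rw [List.map_map]
    apply List.map_congr_left
    intro y _
    rfl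
  rw [hzero]
  have hinitF : pvMat (n.toNat + 1) (fun _ _ => (0 : Int))
      = pvMat (n.toNat + 1) (pvStgF M 0 0) := by
    apply pvMat_congr
    intro m hm' k hk'
    unfold pvStgF
    split_ifs with hcc
    · have : m = 0 ∧ k = 0 := by omega
      obtain ⟨rfl, rfl⟩ := this
      rw [pvFs]
    · rfl
  have hinitC : pvSet2 (pvMat (n.toNat + 1) (fun _ _ => (0 : Int))) 0 0 1
      = pvMat (n.toNat + 1) (pvStgC M 0 0) := by
    rw [show (0 : Int) = ((0 : Nat) : Int) from rfl]
    rw [pvSet2_mat _ (by omega) (by omega)]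
    apply pvMat_congr
    intro m hm' k hk'
    by_cases hc : (m = 0 ∧ k = 0)
    · obtain ⟨rfl, rfl⟩ := hc
      rw [if_pos ⟨rfl, rfl⟩]
      unfold pvStgC
      rw [if_pos (Or.inr ⟨rfl, le_refl _⟩), pvCs, if_pos rfl]
    · rw [if_neg hc]
      unfold pvStgC pvI2
      rw [if_neg (by omega), if_neg (by omega)]
      exact Nat.cast_zero
  rw [hinitC]
  conv_lhs => rw [hinitF]
  rw [pvMfold M (n.toNat + 1) n.toNat (by omega)]
  unfold pvMat
  rw [List.map_map]
  apply List.map_congr_left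
  intro m hmem
  rw [List.mem_range] at hmem
  simp only [Function.comp]
  simp only [PySem.Int.mod]
  congr 1
  rw [pv_list_fin]
  apply Finset.sum_congr rfl
  intro k hkm
  rw [Finset.mem_range] at hkm
  unfold pvStgF
  rw [if_pos (by omega)]

-- ---- loop characterisation, port B
-- ---- 1-D vector machinery for port B
def pvVec (N : Nat) (g : Nat → Int) : List Int := (List.range N).map g

theorem pvVec_congr {N : Nat} {g g' : Nat → Int} (h : ∀ m < N, g m = g' m) :
    pvVec N g = pvVec N g' := by
  unfold pvVec
  apply List.map_congr_left
  intro m hm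
  rw [List.mem_range] at hm
  exact h m hm

theorem pvGet1_vec {N : Nat} (g : Nat → Int) {m : Nat} (hm : m < N) :
    pvGet1 (pvVec N g) (m : Int) = g m := by
  unfold pvGet1 pvVec
  rw [PySem.List.pyGetD_natCast, PySem.List.getD_map_range _ _ _ _ hm]

theorem pvSet1_vec {N : Nat} (g : Nat → Int) {m : Nat} (hm : m < N) (v : Int) :
    PySem.List.pySetD (pvVec N g) (m : Int) v = pvVec N (fun m' => if m' = m then v else g m') := by
  unfold pvVec
  rw [PySem.List.pySetD_natCast]
  apply List.ext_getElem
  · simp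
  · intro i h1 h2
    rw [List.getElem_set]
    simp only [List.getElem_map, List.getElem_range]
    by_cases hi : m = i
    · subst hi; simp
    · rw [if_neg hi, if_neg (fun hh => hi hh.symm)]

def pvBC (M : Int) (m0 m : Nat) : Int := if m ≤ m0 then pvCB M m else 0
def pvBS (M : Int) (m0 m : Nat) : Int := if m ≤ m0 then pvSB M m else 0

theorem pvMStepB_char (M : Int) (N m0 : Nat) (h1 : 1 ≤ m0) (hm : m0 < N) :
    pvMStepB M (pvVec N (pvBC M (m0 - 1)), pvVec N (pvBS M (m0 - 1))) (m0 : Int)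
      = (pvVec N (pvBC M m0), pvVec N (pvBS M m0)) := by
  obtain ⟨m0', rfl⟩ : ∃ t, m0 = t + 1 := ⟨m0 - 1, by omega⟩
  simp only [Nat.add_sub_cancel]
  unfold pvMStepB pvDStepB
  have hr : PySem.List.pyRange 1 (min 9 ((m0' + 1 : Nat) : Int) + 1) 1
      = (List.range (min 9 (m0' + 1))).map (fun j => ((j + 1 : Nat) : Int)) := by
    rw [PySem.List.pyRange_one]
    rw [show ((min 9 ((m0' + 1 : Nat) : Int) + 1) - 1).toNat = min 9 (m0' + 1) from by omega]
    apply List.map_congr_left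
    intro j _
    omega
  rw [hr, List.foldl_map]
  rw [PySem.List.foldl_prod_mk
    (f := fun a (j : Nat) =>
      a + pvGet1 (pvVec N (pvBC M m0')) (((m0' + 1 : Nat) : Int) - ((j + 1 : Nat) : Int)))
    (g := fun s (j : Nat) =>
      s + (10 * pvGet1 (pvVec N (pvBS M m0')) (((m0' + 1 : Nat) : Int) - ((j + 1 : Nat) : Int))
        + ((j + 1 : Nat) : Int) * pvGet1 (pvVec N (pvBC M m0')) (((m0' + 1 : Nat) : Int) - ((j + 1 : Nat) : Int))))]
  rw [PySem.List.foldl_add, PySem.List.foldl_add, zero_add, zero_add]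
  have hC : ∀ j < min 9 (m0' + 1),
      pvGet1 (pvVec N (pvBC M m0')) (((m0' + 1 : Nat) : Int) - ((j + 1 : Nat) : Int))
        = pvCB M (m0' - j) := by
    intro j hj
    rw [show ((m0' + 1 : Nat) : Int) - ((j + 1 : Nat) : Int) = ((m0' - j : Nat) : Int) from by omega]
    rw [pvGet1_vec _ (by omega)]
    unfold pvBC
    rw [if_pos (by omega)]
  have hS : ∀ j < min 9 (m0' + 1),
      pvGet1 (pvVec N (pvBS M m0')) (((m0' + 1 : Nat) : Int) - ((j + 1 : Nat) : Int))
        = pvSB M (m0' - j) := by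
    intro j hj
    rw [show ((m0' + 1 : Nat) : Int) - ((j + 1 : Nat) : Int) = ((m0' - j : Nat) : Int) from by omega]
    rw [pvGet1_vec _ (by omega)]
    unfold pvBS
    rw [if_pos (by omega)]
  have hsumC : ((List.range (min 9 (m0' + 1))).map (fun j =>
      pvGet1 (pvVec N (pvBC M m0')) (((m0' + 1 : Nat) : Int) - ((j + 1 : Nat) : Int)))).sum
      = ∑ i ∈ Finset.range 9, (if i + 1 ≤ m0' + 1 then pvCB M (m0' - i) else 0) := by
    rw [pv_list_fin, ← pv_sum_min9]
    apply Finset.sum_congr rfl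
    intro j hj
    rw [Finset.mem_range] at hj
    exact hC j hj
  have hsumS : ((List.range (min 9 (m0' + 1))).map (fun j =>
      10 * pvGet1 (pvVec N (pvBS M m0')) (((m0' + 1 : Nat) : Int) - ((j + 1 : Nat) : Int))
        + ((j + 1 : Nat) : Int) * pvGet1 (pvVec N (pvBC M m0')) (((m0' + 1 : Nat) : Int) - ((j + 1 : Nat) : Int)))).sum
      = ∑ i ∈ Finset.range 9,
          (if i + 1 ≤ m0' + 1 then 10 * pvSB M (m0' - i) + ((i : Int) + 1) * pvCB M (m0' - i) else 0) := by
    rw [pv_list_fin, ← pv_sum_min9]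
    apply Finset.sum_congr rfl
    intro j hj
    rw [Finset.mem_range] at hj
    rw [hC j hj, hS j hj]
    congr 1
  rw [hsumC, hsumS]
  dsimp only
  rw [pvSet1_vec _ hm, pvSet1_vec _ hm, Prod.mk.injEq]
  constructor
  · apply pvVec_congr
    intro m hm'
    unfold pvBC
    by_cases hc : m = m0' + 1
    · subst hc
      rw [if_pos rfl, if_pos (le_refl _), pvCB]
      simp only [PySem.Int.mod]
    · rw [if_neg hc]
      by_cases hc2 : m ≤ m0'
      · rw [if_pos hc2, if_pos (by omega)]
      · rw [if_neg hc2, if_neg (by omega)]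
  · apply pvVec_congr
    intro m hm'
    unfold pvBS
    by_cases hc : m = m0' + 1
    · subst hc
      rw [if_pos rfl, if_pos (le_refl _), pvSB]
      simp only [PySem.Int.mod]
    · rw [if_neg hc]
      by_cases hc2 : m ≤ m0'
      · rw [if_pos hc2, if_pos (by omega)]
      · rw [if_neg hc2, if_neg (by omega)]

theorem pvBfold (M : Int) (N : Nat) : ∀ T, T < N →
    (List.range T).foldl (fun st m => pvMStepB M st ((m + 1 : Nat) : Int))
        (pvVec N (pvBC M 0), pvVec N (pvBS M 0))
      = (pvVec N (pvBC M T), pvVec N (pvBS M T)) := by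
  intro T
  induction T with
  | zero => intro _; rfl
  | succ T ih =>
    intro hT
    rw [List.range_succ, List.foldl_append, ih (by omega)]
    have h := pvMStepB_char M N (T + 1) (by omega) hT
    simp only [Nat.add_sub_cancel] at h
    simpa using h

theorem pvB_char (n M : Int) (h : 0 ≤ n) : f_eff_list_alt n M =
    (List.range (n.toNat + 1)).map (fun m => Int.fmod (pvSB M m) M) := by
  unfold f_eff_list_alt
  dsimp only
  have hr1 : PySem.List.pyRange 1 (n + 1) 1
      = (List.range n.toNat).map (fun j => ((j + 1 : Nat) : Int)) := by
    rw [PySem.List.pyRange_one]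
    rw [show ((n + 1) - 1).toNat = n.toNat from by omega]
    apply List.map_congr_left
    intro j _
    omega
  have hrep : List.replicate (n + 1).toNat (0 : Int) = pvVec (n.toNat + 1) (fun _ => 0) := by
    unfold pvVec
    rw [show (n + 1).toNat = n.toNat + 1 from by omega]
    rw [eq_comm, List.eq_replicate_iff]
    constructor
    · simp
    · intro b hb
      rcases List.mem_map.1 hb with ⟨_, _, rfl⟩
      rfl
  rw [hr1, hrep, List.foldl_map]
  have hinitC : PySem.List.pySetD (pvVec (n.toNat + 1) (fun _ => 0)) 0 1
      = pvVec (n.toNat + 1) (pvBC M 0) := by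
    rw [show (0 : Int) = ((0 : Nat) : Int) from rfl]
    rw [pvSet1_vec _ (by omega)]
    apply pvVec_congr
    intro m hm'
    unfold pvBC
    by_cases hc : m = 0
    · subst hc
      rw [if_pos rfl, if_pos (le_refl _), pvCB]
    · rw [if_neg hc, if_neg (by omega)]
      exact Nat.cast_zero
  rw [hinitC]
  have hinitS : pvVec (n.toNat + 1) (fun _ => 0) = pvVec (n.toNat + 1) (pvBS M 0) := by
    apply pvVec_congr
    intro m hm'
    unfold pvBS
    by_cases hc : m = 0
    · subst hc
      rw [if_pos (le_refl _), pvSB]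
    · rw [if_neg (by omega)]
  conv_lhs => rw [hinitS]
  rw [pvBfold M (n.toNat + 1) n.toNat (by omega)]
  unfold pvVec
  rw [List.map_map]
  apply List.map_congr_left
  intro m hmem
  rw [List.mem_range] at hmem
  simp only [Function.comp]
  simp only [PySem.Int.mod]
  unfold pvBS
  by_cases hc : m ≤ n.toNat
  · rw [if_pos hc]
  · exfalso; omega

-- ===== VERDICT (by name: the statement is the Claim_ definition above) =====
theorem f_eff_list_spec : Claim_equal_f_eff_list := by
  intro n M _ hpre
  unfold Spec_f_eff_list
  obtain ⟨hn, hM⟩ := hpre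
  rw [pvA_char n M hn, pvB_char n M hn]
  apply List.map_congr_left
  intro m hm
  rw [List.mem_range] at hm
  apply pv_fmod_congr
  calc (∑ k ∈ Finset.range (n.toNat + 1), pvFs M m k)
      ≡ (∑ k ∈ Finset.range (n.toNat + 1), pvFt m k) [ZMOD M] :=
        pv_sum_modEq _ _ _ (fun k _ => pvFs_modEq M k m)
    _ = pvStT m := pvStT_eq m _ hm
    _ ≡ pvSB M m [ZMOD M] := (pvSB_modEq M m).symm
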